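-- pv_equiv track=rewrite | github.com/activeloopai/deeplake | deeplake/util/access_method.py | parse_access_method
-- ===== SOURCE A (Python) =====
-- def parse_access_method(access_method: str):
--     num_workers = 0
--     scheduler = "threaded"
--     download = access_method.startswith("download")
--     local = access_method.startswith("local")
--     if download or local:
--         split = access_method.split(":")
--         if len(split) == 1:
--             split.extend(("threaded", "0"))
--         elif len(split) == 2:
--             split.append("threaded" if split[1].isnumeric() else "0")
--         elif len(split) >= 3:
--             num_integers = sum(1 for i in split if i.isnumeric())
--             if num_integers != 1 or len(split) > 3:
--                 raise ValueError(
--                     "Invalid access_method format. Expected format is one of the following: {download, download:scheduler, download:num_workers, download:scheduler:num_workers, download:num_workers:scheduler}"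
--                 )
--
--         access_method = "download" if download else "local"
--         num_worker_index = 1 if split[1].isnumeric() else 2
--         scheduler_index = 3 - num_worker_index
--         num_workers = int(split[num_worker_index])
--         scheduler = split[scheduler_index]
--     return access_method, num_workers, scheduler
-- ===== SOURCE B (Python) =====
-- def parse_access_method(access_method: str):
--     download = access_method.startswith("download")
--     local = access_method.startswith("local")
--     if not (download or local):
--         return access_method, 0, "threaded"
--     parts = access_method.split(":")[1:]
--     nums = [p for p in parts if p.isnumeric()]
--     strs = [p for p in parts if not p.isnumeric()]
--     if len(parts) >= 2 and not (len(nums) == 1 and len(parts) == 2):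
--         raise ValueError(
--             "Invalid access_method format. Expected format is one of the following: {download, download:scheduler, download:num_workers, download:scheduler:num_workers, download:num_workers:scheduler}"
--         )
--     num_workers = int(nums[0]) if nums else 0
--     scheduler = strs[0] if strs else "threaded"
--     return ("download" if download else "local"), num_workers, scheduler
-- ===== Notes on version B (the rewrite author's own statement) =====
-- stated objective: simpler
-- what changed: Replaces A's pad-the-split-to-three-then-index-arithmetic (num_worker_index/scheduler_index) with a single partition of the tokens after the first colon into numeric and non-numeric lists and reading workers/scheduler from those with defaults.
import Mathlib
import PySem

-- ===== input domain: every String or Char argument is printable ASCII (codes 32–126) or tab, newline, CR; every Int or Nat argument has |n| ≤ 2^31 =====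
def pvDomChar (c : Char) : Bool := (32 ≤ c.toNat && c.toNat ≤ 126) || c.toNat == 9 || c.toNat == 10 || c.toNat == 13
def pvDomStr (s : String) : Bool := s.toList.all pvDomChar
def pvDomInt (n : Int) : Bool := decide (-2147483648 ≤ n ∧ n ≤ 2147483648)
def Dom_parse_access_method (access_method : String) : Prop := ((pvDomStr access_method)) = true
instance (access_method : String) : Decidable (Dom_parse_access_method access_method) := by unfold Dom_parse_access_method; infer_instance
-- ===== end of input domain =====

-- B replaces A's pad-the-split-to-three-then-index-arithmetic with a partition of the
-- tokens after the first colon into numeric and non-numeric lists (objective: simpler).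

-- ===== PORT A =====
def parse_access_method (access_method : String) : String × Int × String :=
  let num_workers : Int := 0
  let scheduler : String := "threaded"
  let download := PySem.Str.startswith access_method "download"
  let locl := PySem.Str.startswith access_method "local"
  if download || locl then
    -- access_method.split(":"); split? is some since ":" ≠ ""
    let split0 := (PySem.Str.split? access_method ":").getD []
    let split :=
      if split0.length = 1 then split0 ++ ["threaded", "0"]
      else if split0.length = 2 then
        split0 ++ [if PySem.Str.strIsdigit (split0.getD 1 "") then "threaded" else "0"]
      else split0
    -- Python str.isnumeric agrees with str.isdigit on the ASCII domain (Dom_): ported as strIsdigit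
    let num_integers : Int :=
      ((split0.map (fun i => if PySem.Str.strIsdigit i then (1 : Int) else 0)).sum)
    if 3 ≤ split0.length ∧ (num_integers ≠ 1 ∨ split0.length > 3) then
      ("", 0, "")  -- Python raises ValueError here; excluded by Pre_
    else
      let access_method' := if download then "download" else "local"
      let num_worker_index : Nat := if PySem.Str.strIsdigit (split.getD 1 "") then 1 else 2
      let scheduler_index : Nat := 3 - num_worker_index
      -- int(...): inside Pre_ the indexed token is always a digit string, so ofStr? is some there
      let num_workers' := (PySem.Int.ofStr? (split.getD num_worker_index "")).getD 0
      let scheduler' := split.getD scheduler_index ""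
      (access_method', num_workers', scheduler')
  else (access_method, num_workers, scheduler)

-- ===== PORT B =====
def parse_access_method_alt (access_method : String) : String × Int × String :=
  let download := PySem.Str.startswith access_method "download"
  let locl := PySem.Str.startswith access_method "local"
  if !(download || locl) then (access_method, 0, "threaded")
  else
    let parts := ((PySem.Str.split? access_method ":").getD []).drop 1
    let nums := parts.filter (fun p => PySem.Str.strIsdigit p)
    let strs := parts.filter (fun p => !PySem.Str.strIsdigit p)
    if 2 ≤ parts.length ∧ ¬(nums.length = 1 ∧ parts.length = 2) then
      ("", 0, "")  -- Python raises ValueError here; outside Pre_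
    else
      let num_workers : Int := match nums with
        | [] => 0
        | n :: _ => (PySem.Int.ofStr? n).getD 0
      let scheduler : String := match strs with
        | [] => "threaded"
        | t :: _ => t
      ((if download then "download" else "local"), num_workers, scheduler)

-- ===== PRECONDITION & SPEC =====
-- Pre_ excludes exactly the inputs on which A raises ValueError: a download/local string with
-- three or more colon-separated fields, or with exactly three fields of which not exactly one is numeric.
def Pre_parse_access_method (access_method : String) : Prop :=
  (PySem.Str.startswith access_method "download" || PySem.Str.startswith access_method "local") = true →
    3 ≤ ((PySem.Str.split? access_method ":").getD []).length →
      (((PySem.Str.split? access_method ":").getD []).countP (fun i => PySem.Str.strIsdigit i) = 1 ∧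
        ((PySem.Str.split? access_method ":").getD []).length = 3)
instance (access_method : String) : Decidable (Pre_parse_access_method access_method) := by
  unfold Pre_parse_access_method; infer_instance

def pvWitness_parse_access_method : String := "download:2:processed"

def Spec_parse_access_method (access_method : String) (out : String × Int × String) : Prop := out = parse_access_method_alt access_method
instance (access_method : String) (out : String × Int × String) : Decidable (Spec_parse_access_method access_method out) := by unfold Spec_parse_access_method; infer_instance

-- ===== CLAIM (what is proved, stated in full; the proofs are below) =====
def Claim_equal_parse_access_method : Prop := ∀ (access_method : String), Dom_parse_access_method access_method → Pre_parse_access_method access_method → Spec_parse_access_method access_method (parse_access_method access_method)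

-- ===== LEMMAS AND PROOFS =====

-- head of splitOn.go when the accumulator is nonempty: its last pushed piece
lemma go_head_last (sep : List Char) : ∀ (fuel : Nat) (l cur : List Char)
    (acc' : List (List Char)) (a : List Char),
    (PySem.Chars.splitOn.go sep fuel l cur (acc' ++ [a])).head? = some a := by
  intro fuel
  induction fuel with
  | zero =>
    intro l cur acc' a
    simp [PySem.Chars.splitOn.go]
  | succ n ih =>
    intro l cur acc' a
    cases l with
    | nil => simp [PySem.Chars.splitOn.go]
    | cons c rest =>
      rw [PySem.Chars.splitOn.go]
      by_cases h : sep.isPrefixOf (c :: rest) = true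
      · simp only [h, if_true]
        have := ih (List.drop sep.length (c :: rest)) [] (cur.reverse :: acc') a
        simpa using this
      · simp only [h]
        simpa using ih rest (c :: cur) acc' a

-- head of splitOn.go with empty accumulator: the current piece extended by some suffix
lemma go_head_nil (sep : List Char) : ∀ (fuel : Nat) (l cur : List Char),
    ∃ u, (PySem.Chars.splitOn.go sep fuel l cur []).head? = some (cur.reverse ++ u) := by
  intro fuel
  induction fuel with
  | zero =>
    intro l cur
    exact ⟨l, by simp [PySem.Chars.splitOn.go]⟩
  | succ n ih =>
    intro l cur
    cases l with
    | nil => exact ⟨[], by simp [PySem.Chars.splitOn.go]⟩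
    | cons c rest =>
      rw [PySem.Chars.splitOn.go]
      by_cases h : sep.isPrefixOf (c :: rest) = true
      · refine ⟨[], ?_⟩
        simp only [h, if_true]
        have := go_head_last sep n (List.drop sep.length (c :: rest)) [] [] cur.reverse
        simpa using this
      · obtain ⟨u, hu⟩ := ih rest (c :: cur)
        refine ⟨c :: u, ?_⟩
        simp only [h]
        simpa using hu

-- head of s.split(":") when s begins with a non-colon character c: some token starting with c
lemma split_head (s : String) (c : Char) (t : List Char)
    (h : s.toList = c :: t) (hc : ¬ [':'].isPrefixOf (c :: t) = true) :
    ∃ u, ((PySem.Str.split? s ":").getD []).head? = some (String.ofList (c :: u)) := by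
  have hsep : (":" : String).toList = [':'] := by decide
  obtain ⟨u, hu⟩ := go_head_nil [':'] (t.length + 1) t [c]
  refine ⟨u, ?_⟩
  simp only [PySem.Str.split?, PySem.Chars.split?, hsep, h]
  rw [PySem.Chars.splitOn]
  simp only [List.length_cons]
  rw [PySem.Chars.splitOn.go]
  simp only [eq_false_intro hc, if_false]
  simp only [List.isEmpty_cons, Bool.false_eq_true, if_false, Option.map_some, Option.getD_some,
    List.head?_map]
  simp only [hu, List.reverse_cons, List.reverse_nil, List.nil_append, List.cons_append,
    Option.map_some]

-- the first token of the split is never a digit string when s starts with "download"/"local"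
lemma split_head_not_digit (s : String)
    (h : (PySem.Str.startswith s "download" || PySem.Str.startswith s "local") = true) :
    ∃ a rest, (PySem.Str.split? s ":").getD [] = a :: rest ∧ PySem.Str.strIsdigit a = false := by
  have hcase : s.toList.head? = some 'd' ∨ s.toList.head? = some 'l' := by
    have h2 := h
    rw [Bool.or_eq_true] at h2
    rcases h2 with h' | h'
    · left
      have hp := (PySem.Chars.startswith_iff s.toList ("download" : String).toList).mp (by simpa [PySem.Str.startswith] using h')
      obtain ⟨t, ht⟩ := hp
      have : ("download" : String).toList = 'd' :: "ownload".toList := by decide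
      rw [← ht, this]; simp
    · right
      have hp := (PySem.Chars.startswith_iff s.toList ("local" : String).toList).mp (by simpa [PySem.Str.startswith] using h')
      obtain ⟨t, ht⟩ := hp
      have : ("local" : String).toList = 'l' :: "ocal".toList := by decide
      rw [← ht, this]; simp
  rcases hcase with hc | hc <;>
  · obtain ⟨t, ht⟩ : ∃ t, s.toList = _ :: t := by
      cases hl : s.toList with
      | nil => rw [hl] at hc; simp at hc
      | cons x xs => rw [hl] at hc; simp at hc; exact ⟨xs, by rw [hc]⟩
    obtain ⟨u, hu⟩ := split_head s _ t ht (by simp [List.isPrefixOf])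
    cases hL : (PySem.Str.split? s ":").getD [] with
    | nil => rw [hL] at hu; simp at hu
    | cons a rest =>
      rw [hL] at hu
      simp only [List.head?_cons, Option.some.injEq] at hu
      refine ⟨a, rest, rfl, ?_⟩
      rw [hu]
      simp [PySem.Str.strIsdigit, PySem.Chars.strIsdigit, PySem.Chars.isdigit]

-- ===== VERDICT (by name: the statement is the Claim_ definition above) =====
theorem parse_access_method_spec : Claim_equal_parse_access_method := by
  intro s _ hpre
  unfold Spec_parse_access_method parse_access_method parse_access_method_alt
  by_cases h : (PySem.Str.startswith s "download" || PySem.Str.startswith s "local") = true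
  · obtain ⟨a, rest, hL, ha⟩ := split_head_not_digit s h
    have ha' : PySem.Chars.strIsdigit a.toList = false := by simpa using ha
    unfold Pre_parse_access_method at hpre
    rw [hL] at hpre
    simp only [h, hL, if_true, Bool.not_true, Bool.false_eq_true, if_false]
    have hth : PySem.Chars.strIsdigit ['t', 'h', 'r', 'e', 'a', 'd', 'e', 'd'] = false := by decide
    have h0 : (PySem.Int.ofStr? "0") = some 0 := by decide
    cases rest with
    | nil => simp [ha', hth, h0, List.getD]
    | cons b rest2 =>
      cases rest2 with
      | nil =>
        by_cases hb : PySem.Chars.strIsdigit b.toList = true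
        · simp [ha', hb, List.getD]
        · simp [ha', Bool.eq_false_iff.mpr hb, h0, List.getD]
      | cons c rest3 =>
        cases rest3 with
        | nil =>
          have hcnt := (hpre h (by simp)).1
          simp only [List.countP_cons, List.countP_nil,
            PySem.Str.strIsdigit_eq, ha'] at hcnt
          by_cases hb : PySem.Chars.strIsdigit b.toList = true <;>
          by_cases hc : PySem.Chars.strIsdigit c.toList = true
          · simp [hb, hc] at hcnt
          · simp [ha', hb, Bool.eq_false_iff.mpr hc, List.getD]
          · simp [ha', Bool.eq_false_iff.mpr hb, hc, List.getD]
          · simp [hb, hc] at hcnt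
        | cons d rest4 =>
          exfalso
          have := (hpre h (by simp)).2
          simp only [List.length_cons] at this
          omega
  · simp only [Bool.or_eq_true, not_or, Bool.not_eq_true] at h
    have h1 : PySem.Chars.startswith s.toList ['d', 'o', 'w', 'n', 'l', 'o', 'a', 'd'] = false := by
      simpa using h.1
    have h2 : PySem.Chars.startswith s.toList ['l', 'o', 'c', 'a', 'l'] = false := by
      simpa using h.2
    simp [h1, h2]
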